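-- pv_equiv track=rewrite | github.com/IgnacioHernandezBas/verifier_harness | verifier/rules/helpers.py | parse_patch_by_file
-- ===== SOURCE A (Python) =====
-- from typing import Any, Callable, Dict, Iterable, List, Optional, Tuple
--
-- def parse_patch_by_file(patch_str: str) -> Dict[str, Dict[str, List[str]]]:
--     """Collect added and removed lines for each file in a patch."""
--     data: Dict[str, Dict[str, List[str]]] = {}
--     current_file: Optional[str] = None
--     for line in patch_str.splitlines():
--         if line.startswith("+++ "):
--             path = line[4:].strip()
--             if path.startswith("b/"):
--                 path = path[2:]
--             current_file = path
--             data.setdefault(path, {"added": [], "removed": []})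
--             continue
--         if current_file is None:
--             continue
--         if line.startswith("+") and not line.startswith("+++"):
--             data[current_file]["added"].append(line[1:])
--         elif line.startswith("-") and not line.startswith("---"):
--             data[current_file]["removed"].append(line[1:])
--     return data
-- ===== SOURCE B (Python) =====
-- def parse_patch_by_file(patch_str: str):
--     """Collect added and removed lines for each file in a patch.
--
--     Two-phase: find the '+++ ' header positions, slice the line list into
--     per-file segments, then scan each segment body once.
--     """
--     lines = patch_str.splitlines()
--     data = {}
--     n = len(lines)
--     i = 0
--     while i < n and not lines[i].startswith("+++ "):
--         i += 1  # discard everything before the first file header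
--     while i < n:
--         path = lines[i][4:].strip()
--         if path.startswith("b/"):
--             path = path[2:]
--         entry = data.setdefault(path, {"added": [], "removed": []})
--         j = i + 1
--         while j < n and not lines[j].startswith("+++ "):
--             j += 1
--         for line in lines[i + 1:j]:
--             if line.startswith("+") and not line.startswith("+++"):
--                 entry["added"].append(line[1:])
--             elif line.startswith("-") and not line.startswith("---"):
--                 entry["removed"].append(line[1:])
--         i = j
--     return data
-- ===== Notes on version B (the rewrite author's own statement) =====
-- stated objective: alternative
-- what changed: A's single pass threading a current_file state is replaced by a two-phase decomposition: slice the line list into per-file-header segments (discarding the pre-header prefix), then scan each segment body once, merging repeated paths via setdefault.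
import Mathlib
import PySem

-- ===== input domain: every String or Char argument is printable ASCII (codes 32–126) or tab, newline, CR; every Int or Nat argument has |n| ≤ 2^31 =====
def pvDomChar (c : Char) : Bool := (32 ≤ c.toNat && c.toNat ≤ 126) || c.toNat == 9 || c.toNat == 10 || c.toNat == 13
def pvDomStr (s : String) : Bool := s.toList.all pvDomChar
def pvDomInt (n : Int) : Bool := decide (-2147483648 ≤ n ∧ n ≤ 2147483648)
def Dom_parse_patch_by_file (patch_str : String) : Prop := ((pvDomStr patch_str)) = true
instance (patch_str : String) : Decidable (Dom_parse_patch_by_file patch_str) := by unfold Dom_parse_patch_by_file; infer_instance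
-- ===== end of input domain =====

-- B re-decomposes A's single stateful pass as header-segmentation plus a per-segment scan (objective: alternative decomposition, same cost).

-- ===== PORT A =====
-- line.startswith("+++ ")
def pvIsHeader (l : String) : Bool := PySem.Str.startswith l "+++ "

-- path = line[4:].strip(); if path.startswith("b/"): path = path[2:]
def pvPathA (line : String) : String :=
  let path := PySem.Str.strip (PySem.Str.slice line (some 4) none)
  if PySem.Str.startswith path "b/" then PySem.Str.slice path (some 2) none else path

-- {"added": [], "removed": []}
def pvEntryA : PySem.Dict String (List String) :=
  PySem.Dict.ofList [("added", ([] : List String)), ("removed", ([] : List String))]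

-- the body of A's for-loop; state = (data, current_file); mutation of data[cur] modelled by Dict.modify
def pvStepA (st : PySem.Dict String (PySem.Dict String (List String)) × Option String)
    (line : String) : PySem.Dict String (PySem.Dict String (List String)) × Option String :=
  if pvIsHeader line then
    let path := pvPathA line
    (st.1.setdefault path pvEntryA, some path)
  else
    match st.2 with
    | none => st
    | some f =>
      if PySem.Str.startswith line "+" && !(PySem.Str.startswith line "+++") then
        (st.1.modify f PySem.Dict.empty
          (fun m => m.modify "added" [] (fun xs => xs ++ [PySem.Str.slice line (some 1) none])), st.2)
      else if PySem.Str.startswith line "-" && !(PySem.Str.startswith line "---") then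
        (st.1.modify f PySem.Dict.empty
          (fun m => m.modify "removed" [] (fun xs => xs ++ [PySem.Str.slice line (some 1) none])), st.2)
      else st

def parse_patch_by_file (patch_str : String) : List (String × List (String × List String)) :=
  (((PySem.Str.splitlines patch_str).foldl pvStepA (PySem.Dict.empty, none)).1.items.map
    (fun p => (p.1, p.2.items)))

-- ===== PORT B =====
def pvPathB (header : String) : String :=
  let path := PySem.Str.strip (PySem.Str.slice header (some 4) none)
  if PySem.Str.startswith path "b/" then PySem.Str.slice path (some 2) none else path

def pvEntryB : PySem.Dict String (List String) :=
  PySem.Dict.ofList [("added", ([] : List String)), ("removed", ([] : List String))]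

-- one body line; 'entry' aliases data[path] in Source B, so appending through it is Dict.modify at path
def pvBodyB (path : String) (d : PySem.Dict String (PySem.Dict String (List String)))
    (line : String) : PySem.Dict String (PySem.Dict String (List String)) :=
  if PySem.Str.startswith line "+" && !(PySem.Str.startswith line "+++") then
    d.modify path PySem.Dict.empty
      (fun m => m.modify "added" [] (fun xs => xs ++ [PySem.Str.slice line (some 1) none]))
  else if PySem.Str.startswith line "-" && !(PySem.Str.startswith line "---") then
    d.modify path PySem.Dict.empty
      (fun m => m.modify "removed" [] (fun xs => xs ++ [PySem.Str.slice line (some 1) none]))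
  else d

-- Source B's index scans: skip to the next header (the two inner whiles), cut the body out, repeat
def pvSegs : List String → List (String × List String)
  | [] => []
  | l :: ls =>
    if pvIsHeader l then
      (l, ls.takeWhile (fun x => !pvIsHeader x)) :: pvSegs (ls.dropWhile (fun x => !pvIsHeader x))
    else pvSegs ls
termination_by ls => ls.length
decreasing_by
  · exact Nat.lt_succ_of_le (List.length_dropWhile_le _ _)
  · exact Nat.lt_succ_self _

-- one iteration of Source B's outer while: path from the header, setdefault, scan the body
def pvSegProcB (d : PySem.Dict String (PySem.Dict String (List String)))
    (seg : String × List String) : PySem.Dict String (PySem.Dict String (List String)) :=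
  (seg.2).foldl (pvBodyB (pvPathB seg.1)) (d.setdefault (pvPathB seg.1) pvEntryB)

def parse_patch_by_file_alt (patch_str : String) : List (String × List (String × List String)) :=
  ((pvSegs (PySem.Str.splitlines patch_str)).foldl pvSegProcB PySem.Dict.empty).items.map
    (fun p => (p.1, p.2.items))

-- ===== PRECONDITION & SPEC =====
def Spec_parse_patch_by_file (patch_str : String) (out : List (String × List (String × List String))) : Prop := out = parse_patch_by_file_alt patch_str
instance (patch_str : String) (out : List (String × List (String × List String))) : Decidable (Spec_parse_patch_by_file patch_str out) := by unfold Spec_parse_patch_by_file; infer_instance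

-- ===== CLAIM (what is proved, stated in full; the proofs are below) =====
def Claim_equal_parse_patch_by_file : Prop := ∀ (patch_str : String), Dom_parse_patch_by_file patch_str → Spec_parse_patch_by_file patch_str (parse_patch_by_file patch_str)

-- ===== LEMMAS AND PROOFS =====
-- with current_file = f and the current line not a header, A's step is B's body step
lemma pvStepA_body (d : PySem.Dict String (PySem.Dict String (List String))) (f : String)
    (line : String) (h : pvIsHeader line = false) :
    pvStepA (d, some f) line = (pvBodyB f d line, some f) := by
  simp only [pvStepA, pvBodyB, h, Bool.false_eq_true, if_false]
  split_ifs <;> rfl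

-- from a header onward, A's fold is: finish the current body, then process the remaining segments
lemma pvFold_some (ls : List String) : ∀ (d : PySem.Dict String (PySem.Dict String (List String)))
    (f : String),
    (ls.foldl pvStepA (d, some f)).1 =
      (pvSegs (ls.dropWhile (fun x => !pvIsHeader x))).foldl pvSegProcB
        ((ls.takeWhile (fun x => !pvIsHeader x)).foldl (pvBodyB f) d) := by
  induction ls with
  | nil => intro d f; simp [pvSegs]
  | cons l ls ih =>
    intro d f
    by_cases h : pvIsHeader l
    · simp only [List.foldl_cons, pvStepA, h, if_true, List.dropWhile_cons,
        Bool.not_true, Bool.false_eq_true, if_false, List.takeWhile_cons, List.foldl_nil]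
      rw [pvSegs, if_pos h]
      simp only [List.foldl_cons, ih, pvSegProcB]
      rfl
    · have h' : pvIsHeader l = false := by simpa using h
      simp only [List.foldl_cons, pvStepA_body _ _ _ h', List.dropWhile_cons,
        List.takeWhile_cons, h', Bool.not_false, if_true]
      exact ih (pvBodyB f d l) f

-- before the first header, A skips; B's segmentation discards the same prefix
lemma pvFold_none (ls : List String) : ∀ (d : PySem.Dict String (PySem.Dict String (List String))),
    (ls.foldl pvStepA (d, none)).1 = (pvSegs ls).foldl pvSegProcB d := by
  induction ls with
  | nil => intro d; simp [pvSegs]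
  | cons l ls ih =>
    intro d
    by_cases h : pvIsHeader l
    · simp only [List.foldl_cons, pvStepA, h, if_true]
      rw [pvSegs, if_pos h]
      simp only [pvFold_some, List.foldl_cons, pvSegProcB]
      rfl
    · have h' : pvIsHeader l = false := by simpa using h
      simp only [List.foldl_cons, pvStepA, h', Bool.false_eq_true, if_false]
      rw [pvSegs, if_neg h]
      exact ih d

-- ===== VERDICT (by name: the statement is the Claim_ definition above) =====
theorem parse_patch_by_file_spec : Claim_equal_parse_patch_by_file := by
  intro patch_str _
  unfold Spec_parse_patch_by_file parse_patch_by_file parse_patch_by_file_alt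
  rw [pvFold_none]
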